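-- pv_equiv track=rewrite | github.com/JorgeVB20007/aoc2024_challenge | day22/pt2/day22.py | is_valid_comb
-- ===== SOURCE A (Python) =====
-- def is_valid_comb(comb: tuple) -> bool:
-- 	tempresult = 0
-- 	tempresults = []
-- 	for idx in comb:
-- 		tempresult += idx
-- 		tempresults.append(tempresult)
-- 		if tempresult < -9 or tempresult > 9:
-- 			break
-- 	if tempresult >= -9 and tempresult <= 9 and max(tempresults) - min(tempresults) <= 9:
-- 		return True
-- 	return False
-- ===== SOURCE B (Python) =====
-- def is_valid_comb(comb: tuple) -> bool:
--     # A combination is valid iff every contiguous window of it sums to at most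
--     # 9 in absolute value: windows starting at index 0 are A's "every running
--     # prefix stays in [-9, 9]" condition, and the remaining windows are exactly
--     # the pairwise differences of prefix sums, i.e. A's max-min <= 9 test.
--     n = len(comb)
--     return all(abs(sum(comb[i:j])) <= 9
--                for i in range(n) for j in range(i + 1, n + 1))
-- ===== Notes on version B (the rewrite author's own statement) =====
-- stated objective: alternative
-- what changed: Replaces A's single accumulator pass (running prefix sum, early break, max/min spread test) by a brute-force check over all contiguous windows: the comb is valid iff every window sum has absolute value at most 9.
-- outside the precondition, e.g. on is_valid_comb(()): A raises ValueError, B returns True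
import Mathlib
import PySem

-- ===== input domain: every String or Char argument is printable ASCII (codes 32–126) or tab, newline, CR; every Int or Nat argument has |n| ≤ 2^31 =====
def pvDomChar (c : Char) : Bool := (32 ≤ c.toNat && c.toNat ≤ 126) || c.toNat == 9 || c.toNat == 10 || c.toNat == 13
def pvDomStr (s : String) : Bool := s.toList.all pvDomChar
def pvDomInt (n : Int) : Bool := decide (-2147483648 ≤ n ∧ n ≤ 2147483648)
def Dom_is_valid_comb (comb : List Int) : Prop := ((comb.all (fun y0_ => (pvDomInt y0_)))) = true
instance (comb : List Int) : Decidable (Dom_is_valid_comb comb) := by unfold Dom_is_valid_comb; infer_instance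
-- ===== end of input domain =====

-- B replaces A's single accumulator pass (running prefix, early break, max/min spread
-- test) by a brute-force check that every contiguous window sum is in [-9, 9]
-- (objective: alternative algorithm, not faster).

-- ===== PORT A =====
-- A's for-loop with break: recursion over comb carrying (tempresult, tempresults);
-- break returns the state at that point.
def isValidCombLoopA (t : Int) (rs : List Int) : List Int → Int × List Int
  | [] => (t, rs)
  | x :: xs =>
    let t' := t + x
    let rs' := rs ++ [t']
    if t' < -9 ∨ t' > 9 then (t', rs') else isValidCombLoopA t' rs' xs

-- max(l)/min(l): Python raises on empty; Pre_ excludes comb = [], under which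
-- tempresults is nonempty, so the .getD 0 default is never the value used.
def is_valid_comb (comb : List Int) : Bool :=
  let st := isValidCombLoopA 0 [] comb
  let t := st.1
  let rs := st.2
  if t ≥ -9 ∧ t ≤ 9 ∧ (PySem.List.max? rs (fun y => y)).getD 0 - (PySem.List.min? rs (fun y => y)).getD 0 ≤ 9
  then true else false

-- ===== PORT B =====
-- B: all(abs(sum(comb[i:j])) <= 9 for i in range(n) for j in range(i+1, n+1))
def is_valid_comb_alt (comb : List Int) : Bool :=
  let n : Int := PySem.List.len comb
  (PySem.List.pyRange 0 n 1).all (fun i =>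
    (PySem.List.pyRange (i + 1) (n + 1) 1).all (fun j =>
      decide (|(PySem.List.slice comb (some i) (some j)).sum| ≤ 9)))

-- ===== PRECONDITION & SPEC =====
-- Pre_ excludes only the empty list, on which A raises ValueError (max of empty sequence).
def Pre_is_valid_comb (comb : List Int) : Prop := comb ≠ []
instance (comb : List Int) : Decidable (Pre_is_valid_comb comb) := by unfold Pre_is_valid_comb; infer_instance
def pvWitness_is_valid_comb : List Int := [1, -2, 3]

def Spec_is_valid_comb (comb : List Int) (out : Bool) : Prop := out = is_valid_comb_alt comb
instance (comb : List Int) (out : Bool) : Decidable (Spec_is_valid_comb comb out) := by unfold Spec_is_valid_comb; infer_instance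

-- ===== CLAIM (what is proved, stated in full; the proofs are below) =====
def Claim_equal_is_valid_comb : Prop := ∀ (comb : List Int), Dom_is_valid_comb comb → Pre_is_valid_comb comb → Spec_is_valid_comb comb (is_valid_comb comb)

-- ===== LEMMAS AND PROOFS =====

-- the pure prefix-sum list starting from running sum t
def pvSums (t : Int) : List Int → List Int
  | [] => []
  | x :: xs => (t + x) :: pvSums (t + x) xs

def pvMaxD (l : List Int) : Int := (PySem.List.max? l (fun y => y)).getD 0
def pvMinD (l : List Int) : Int := (PySem.List.min? l (fun y => y)).getD 0

-- A's final test over a prefix list, as a Bool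
def pvCondA (p : List Int) : Bool :=
  decide (pvMaxD p ≤ 9) && decide (pvMinD p ≥ -9) && decide (pvMaxD p - pvMinD p ≤ 9)

-- the window condition B checks, over take-sums
def pvQ (comb : List Int) : Prop :=
  ∀ i j : Nat, i < j → j ≤ comb.length → |((comb.take j).sum - (comb.take i).sum : Int)| ≤ 9

lemma pvMaxD_mem {l : List Int} (h : l ≠ []) : pvMaxD l ∈ l := by
  unfold pvMaxD
  rcases hm : PySem.List.max? l (fun y => y) with _ | m
  · exact absurd ((PySem.List.max?_eq_none_iff l (fun y => y)).1 hm) h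
  · simpa using PySem.List.max?_mem hm

lemma pvMinD_mem {l : List Int} (h : l ≠ []) : pvMinD l ∈ l := by
  unfold pvMinD
  rcases hm : PySem.List.min? l (fun y => y) with _ | m
  · exact absurd ((PySem.List.min?_eq_none_iff l (fun y => y)).1 hm) h
  · simpa using PySem.List.min?_mem hm

lemma le_pvMaxD {l : List Int} {y : Int} (hy : y ∈ l) : y ≤ pvMaxD l := by
  unfold pvMaxD
  rcases hm : PySem.List.max? l (fun y => y) with _ | m
  · exact absurd ((PySem.List.max?_eq_none_iff l (fun y => y)).1 hm) (List.ne_nil_of_mem hy)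
  · simpa using PySem.List.max?_isMax hm y hy

lemma pvMinD_le {l : List Int} {y : Int} (hy : y ∈ l) : pvMinD l ≤ y := by
  unfold pvMinD
  rcases hm : PySem.List.min? l (fun y => y) with _ | m
  · exact absurd ((PySem.List.min?_eq_none_iff l (fun y => y)).1 hm) (List.ne_nil_of_mem hy)
  · simpa using PySem.List.min?_isMin hm y hy

-- if some element of p is out of range, A's test is false
lemma pvCondA_false_of_out {p : List Int} {y : Int} (hy : y ∈ p) (hout : y < -9 ∨ y > 9) :
    pvCondA p = false := by
  unfold pvCondA
  rcases hout with h | h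
  · have := pvMinD_le hy
    have : ¬ (pvMinD p ≥ -9) := by omega
    simp [this]
  · have := le_pvMaxD hy
    have : ¬ (pvMaxD p ≤ 9) := by omega
    simp [this]

-- membership in the prefix-sum list = a take-sum
lemma mem_pvSums (l : List Int) : ∀ (t y : Int),
    y ∈ pvSums t l ↔ ∃ k : Nat, k < l.length ∧ y = t + (l.take (k + 1)).sum := by
  induction l with
  | nil => intro t y; simp [pvSums]
  | cons x xs ih =>
    intro t y
    simp only [pvSums, List.mem_cons, ih, List.length_cons]
    constructor
    · rintro (rfl | ⟨k, hk, rfl⟩)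
      · exact ⟨0, by omega, by simp⟩
      · exact ⟨k + 1, by omega, by simp [List.take_succ_cons]; ring⟩
    · rintro ⟨k, hk, rfl⟩
      cases k with
      | zero => left; simp
      | succ k' => right; exact ⟨k', by omega, by simp [List.take_succ_cons]; ring⟩

-- A's loop invariant: from an in-range state, the final test equals pvCondA of the full prefix list
lemma loop_main (comb : List Int) : ∀ (t : Int) (acc : List Int),
    acc ≠ [] → (∀ y ∈ acc, -9 ≤ y ∧ y ≤ 9) → (-9 ≤ t ∧ t ≤ 9) →
    (let st := isValidCombLoopA t acc comb
     (if st.1 ≥ -9 ∧ st.1 ≤ 9 ∧ pvMaxD st.2 - pvMinD st.2 ≤ 9 then true else false))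
      = pvCondA (acc ++ pvSums t comb) := by
  induction comb with
  | nil =>
    intro t acc hne hin ht
    simp only [isValidCombLoopA, pvSums, List.append_nil, pvCondA]
    have hmax : pvMaxD acc ≤ 9 := (hin _ (pvMaxD_mem hne)).2
    have hmin : pvMinD acc ≥ -9 := (hin _ (pvMinD_mem hne)).1
    by_cases hsp : pvMaxD acc - pvMinD acc ≤ 9
    · simp [ht.1, ht.2, hsp, hmax, hmin]
    · simp [hsp]
  | cons x xs ih =>
    intro t acc hne hin ht
    by_cases hout : t + x < -9 ∨ t + x > 9
    · have hloop : isValidCombLoopA t acc (x :: xs) = (t + x, acc ++ [t + x]) := by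
        simp [isValidCombLoopA, hout]
      have hmem : t + x ∈ acc ++ pvSums t (x :: xs) := by simp [pvSums]
      have hfalse : ¬ ((t + x) ≥ -9 ∧ (t + x) ≤ 9 ∧ pvMaxD (acc ++ [t + x]) - pvMinD (acc ++ [t + x]) ≤ 9) := by
        rcases hout with h | h <;> (intro hc; omega)
      simp only [hloop]
      rw [pvCondA_false_of_out hmem hout, if_neg hfalse]
    · have hloop : isValidCombLoopA t acc (x :: xs) = isValidCombLoopA (t + x) (acc ++ [t + x]) xs := by
        simp [isValidCombLoopA, hout]
      have hrange : -9 ≤ t + x ∧ t + x ≤ 9 := by omega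
      have := ih (t + x) (acc ++ [t + x]) (by simp)
        (by intro y hy
            rcases List.mem_append.1 hy with h | h
            · exact hin y h
            · simp at h; omega)
        hrange
      simp only [hloop, pvSums]
      simpa [List.append_assoc] using this

-- A = pvCondA of the full prefix list, on nonempty input
lemma A_eq_condA {comb : List Int} (h : comb ≠ []) :
    is_valid_comb comb = pvCondA (pvSums 0 comb) := by
  rcases comb with _ | ⟨x, xs⟩
  · exact absurd rfl h
  show (let st := isValidCombLoopA 0 [] (x :: xs)
        if st.1 ≥ -9 ∧ st.1 ≤ 9 ∧ pvMaxD st.2 - pvMinD st.2 ≤ 9 then true else false)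
      = pvCondA (pvSums 0 (x :: xs))
  by_cases hout : x < -9 ∨ x > 9
  · have hloop : isValidCombLoopA 0 [] (x :: xs) = (x, [x]) := by
      rcases hout with h | h <;> simp [isValidCombLoopA, h]
    have hmem : x ∈ pvSums 0 (x :: xs) := by simp [pvSums]
    have hfalse : ¬ ((x : Int) ≥ -9 ∧ (x : Int) ≤ 9 ∧ pvMaxD [x] - pvMinD [x] ≤ 9) := by
      rcases hout with h | h <;> (intro hc; omega)
    simp only [hloop]
    rw [pvCondA_false_of_out hmem hout, if_neg hfalse]
  · have hloop : isValidCombLoopA 0 [] (x :: xs) = isValidCombLoopA x [x] xs := by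
      simp [isValidCombLoopA, hout]
    have hrange : -9 ≤ x ∧ x ≤ 9 := by omega
    have := loop_main xs x [x] (by simp) (by intro y hy; simp at hy; omega) hrange
    simp only [hloop, pvSums, zero_add]
    simpa using this

-- sum of a drop/take window in terms of take-sums
lemma sum_drop_take (l : List Int) (a b : Nat) :
    ((l.drop a).take b).sum = (l.take (a + b)).sum - (l.take a).sum := by
  have h : l.take (a + b) = l.take a ++ (l.drop a).take b := List.take_add
  rw [h, List.sum_append]; ring

-- pvCondA of the prefix list ↔ the window condition, on nonempty input
lemma condA_iff_Q {comb : List Int} (h : comb ≠ []) :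
    pvCondA (pvSums 0 comb) = true ↔ pvQ comb := by
  have hSne : pvSums 0 comb ≠ [] := by
    rcases comb with _ | ⟨x, xs⟩
    · exact absurd rfl h
    · simp [pvSums]
  have hmem : ∀ y : Int, y ∈ pvSums 0 comb ↔ ∃ k : Nat, k < comb.length ∧ y = (comb.take (k + 1)).sum := by
    intro y; simpa using mem_pvSums comb 0 y
  constructor
  · intro hc
    have hc' : pvMaxD (pvSums 0 comb) ≤ 9 ∧ pvMinD (pvSums 0 comb) ≥ -9 ∧
        pvMaxD (pvSums 0 comb) - pvMinD (pvSums 0 comb) ≤ 9 := by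
      unfold pvCondA at hc; simp only [Bool.and_eq_true, decide_eq_true_eq] at hc
      exact ⟨hc.1.1, hc.1.2, hc.2⟩
    intro i j hij hj
    have hjS : ((comb.take j).sum : Int) ∈ pvSums 0 comb := by
      rw [hmem]; exact ⟨j - 1, by omega, by rw [Nat.sub_add_cancel (by omega : 1 ≤ j)]⟩
    have hjmax := le_pvMaxD hjS
    have hjmin := pvMinD_le hjS
    cases Nat.eq_zero_or_pos i with
    | inl h0 =>
      subst h0; simp only [List.take_zero, List.sum_nil]
      rw [abs_le]; omega
    | inr hpos =>
      have hiS : ((comb.take i).sum : Int) ∈ pvSums 0 comb := by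
        rw [hmem]; exact ⟨i - 1, by omega, by rw [Nat.sub_add_cancel (by omega : 1 ≤ i)]⟩
      have himax := le_pvMaxD hiS
      have himin := pvMinD_le hiS
      rw [abs_le]; omega
  · intro hQ
    have hb : ∀ y ∈ pvSums 0 comb, -9 ≤ y ∧ y ≤ 9 := by
      intro y hy
      obtain ⟨k, hk, rfl⟩ := (hmem y).1 hy
      have := hQ 0 (k + 1) (by omega) (by omega)
      simp only [List.take_zero, List.sum_nil, sub_zero] at this
      exact abs_le.1 this
    have hmax := hb _ (pvMaxD_mem hSne)
    have hmin := hb _ (pvMinD_mem hSne)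
    have hspread : pvMaxD (pvSums 0 comb) - pvMinD (pvSums 0 comb) ≤ 9 := by
      obtain ⟨a, ha, hMa⟩ := (hmem _).1 (pvMaxD_mem hSne)
      obtain ⟨b, hbb, hMb⟩ := (hmem _).1 (pvMinD_mem hSne)
      rcases lt_trichotomy (a + 1) (b + 1) with hlt | heq | hgt
      · have := abs_le.1 (hQ (a + 1) (b + 1) hlt (by omega))
        omega
      · rw [hMa, hMb, heq]; omega
      · have := abs_le.1 (hQ (b + 1) (a + 1) hgt (by omega))
        omega
    unfold pvCondA
    simp [hmax.2, hmin.1, hspread]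

-- B ↔ the window condition
lemma altB_iff_Q (comb : List Int) : is_valid_comb_alt comb = true ↔ pvQ comb := by
  unfold is_valid_comb_alt
  simp only [List.all_eq_true, PySem.List.mem_pyRange_one, decide_eq_true_eq, PySem.List.len_eq]
  constructor
  · intro hB i j hij hj
    have hB' := hB (i : Int) ⟨by omega, by exact_mod_cast Nat.lt_of_lt_of_le hij hj⟩
      (j : Int) ⟨by exact_mod_cast hij, by omega⟩
    rwa [PySem.List.slice_natCast, sum_drop_take, Nat.add_sub_cancel' (Nat.le_of_lt hij)] at hB'
  · rintro hQ i ⟨hi0, hin⟩ j ⟨hji, hjn⟩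
    have hij : i < j := by omega
    have hj0 : 0 ≤ j := by omega
    have hslice : PySem.List.slice comb (some i) (some j)
        = (comb.drop i.toNat).take (j.toNat - i.toNat) := PySem.List.slice_toNat comb hi0 hj0
    rw [hslice, sum_drop_take, Nat.add_sub_cancel' (by omega : i.toNat ≤ j.toNat)]
    exact hQ i.toNat j.toNat (by omega) (by omega)

-- ===== VERDICT (by name: the statement is the Claim_ definition above) =====
theorem is_valid_comb_spec : Claim_equal_is_valid_comb := by
  intro comb _ hpre
  unfold Spec_is_valid_comb
  have hA : is_valid_comb comb = true ↔ pvQ comb :=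
    (A_eq_condA hpre ▸ condA_iff_Q hpre)
  have hB := altB_iff_Q comb
  rcases hvA : is_valid_comb comb with _ | _ <;> rcases hvB : is_valid_comb_alt comb with _ | _
  · rfl
  · exact absurd (hA.2 (hB.1 hvB)) (by simp [hvA])
  · exact absurd (hB.2 (hA.1 hvA)) (by simp [hvB])
  · rfl
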